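-- pv_equiv track=rewrite | github.com/T0P1KWER/AOIS | lab2/logic.py | build_difference_triangle
-- ===== SOURCE A (Python) =====
-- def build_difference_triangle(values):
--     triangle = [values[:]]
--     current_row = values[:]
--     while len(current_row) > 1:
--         next_row = []
--         index = 0
--         while index < len(current_row) - 1:
--             next_row.append(current_row[index] ^ current_row[index + 1])
--             index += 1
--         triangle.append(next_row)
--         current_row = next_row
--     return triangle
-- ===== SOURCE B (Python) =====
-- def build_difference_triangle(values):
--     n = len(values)
--     triangle = []
--     for i in range(max(1, n)):
--         row = []
--         for j in range(n - i):
--             entry = 0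
--             binom = 1  # running binomial coefficient C(i, m)
--             for m in range(i + 1):
--                 if binom % 2 == 1:
--                     entry ^= values[j + m]
--                 binom = binom * (i - m) // (m + 1)
--             row.append(entry)
--         triangle.append(row)
--     return triangle
-- ===== Notes on version B (the rewrite author's own statement) =====
-- stated objective: alternative
-- what changed: Each triangle entry is computed directly from the original list as the XOR of values[j+m] over the m with odd binomial coefficient C(i,m) (maintained by the multiplicative Pascal recurrence), instead of deriving each row from the previous one.
import Mathlib
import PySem

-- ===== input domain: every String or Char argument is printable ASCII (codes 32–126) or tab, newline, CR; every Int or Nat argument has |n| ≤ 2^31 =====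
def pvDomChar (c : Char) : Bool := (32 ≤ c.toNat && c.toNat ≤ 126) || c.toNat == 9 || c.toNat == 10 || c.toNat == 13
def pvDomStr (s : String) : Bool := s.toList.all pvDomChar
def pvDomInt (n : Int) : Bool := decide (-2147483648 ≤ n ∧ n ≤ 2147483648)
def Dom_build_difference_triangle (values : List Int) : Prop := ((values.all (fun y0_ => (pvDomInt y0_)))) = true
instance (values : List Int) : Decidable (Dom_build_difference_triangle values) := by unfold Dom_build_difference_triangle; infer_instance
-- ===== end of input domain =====

-- B computes every triangle entry directly from the input list via binomial parity (alternative
-- decomposition, no reference to previous rows); equivalence of the return values is proved below.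

-- ===== PORT A =====
-- inner while loop: next_row.append(current_row[index] ^ current_row[index+1]); index += 1
-- (current_row[index] is always in range here, so List.getD is exact for Python's indexing;
--  the fuel argument only bounds the iteration count — the while condition is what stops the loop)
def pairAuxA (r : List Int) (fuel index : Nat) (next_row : List Int) : List Int :=
  match fuel with
  | 0 => next_row
  | fuel + 1 =>
    if index < r.length - 1 then
      pairAuxA r fuel (index + 1)
        (next_row ++ [PySem.Int.bxor (r.getD index 0) (r.getD (index + 1) 0)])
    else next_row

-- outer while loop: while len(current_row) > 1
def triAuxA (fuel : Nat) (triangle : List (List Int)) (current_row : List Int) : List (List Int) :=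
  match fuel with
  | 0 => triangle
  | fuel + 1 =>
    if current_row.length > 1 then
      triAuxA fuel (triangle ++ [pairAuxA current_row current_row.length 0 []])
        (pairAuxA current_row current_row.length 0 [])
    else triangle

def build_difference_triangle (values : List Int) : List (List Int) :=
  triAuxA values.length [values] values

-- ===== PORT B =====
-- entry (i, j): XOR of values[j+m] over m with C(i,m) odd; binom is the running coefficient
-- (values[j+m] is always in range here, so List.getD is exact for Python's indexing)
def entryAlt (values : List Int) (i j : Nat) : Int :=
  ((List.range (i + 1)).foldl
    (fun (ec : Int × Int) m =>
      (if PySem.Int.mod ec.2 2 = 1 then PySem.Int.bxor ec.1 (values.getD (j + m) 0) else ec.1,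
       PySem.Int.floordiv (ec.2 * ((i : Int) - (m : Int))) ((m : Int) + 1)))
    (0, 1)).1

def build_difference_triangle_alt (values : List Int) : List (List Int) :=
  (List.range (max 1 values.length)).map (fun i =>
    (List.range (values.length - i)).map (fun j => entryAlt values i j))

-- ===== PRECONDITION & SPEC =====
def Spec_build_difference_triangle (values : List Int) (out : List (List Int)) : Prop := out = build_difference_triangle_alt values
instance (values : List Int) (out : List (List Int)) : Decidable (Spec_build_difference_triangle values out) := by unfold Spec_build_difference_triangle; infer_instance

-- ===== CLAIM (what is proved, stated in full; the proofs are below) =====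
def Claim_equal_build_difference_triangle : Prop := ∀ (values : List Int), Dom_build_difference_triangle values → Spec_build_difference_triangle values (build_difference_triangle values)

-- ===== LEMMAS AND PROOFS =====

-- ---- xor algebra on Int (PySem.Int.bxor) ----
def pvDec (s : Bool) (n : Nat) : Int := if s then -(n : Int) - 1 else (n : Int)

theorem bxor_dec (s t : Bool) (m n : Nat) :
    PySem.Int.bxor (pvDec s m) (pvDec t n) = pvDec (s != t) (m ^^^ n) := by
  cases s <;> cases t <;> simp [pvDec, PySem.Int.bxor] <;> omega

theorem dec_surj (a : Int) : ∃ s n, a = pvDec s n := by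
  by_cases h : 0 ≤ a
  · exact ⟨false, a.toNat, by simp [pvDec]; omega⟩
  · exact ⟨true, (-a - 1).toNat, by simp [pvDec]; omega⟩

theorem bxor_assoc (a b c : Int) :
    PySem.Int.bxor (PySem.Int.bxor a b) c = PySem.Int.bxor a (PySem.Int.bxor b c) := by
  obtain ⟨s, m, rfl⟩ := dec_surj a
  obtain ⟨t, n, rfl⟩ := dec_surj b
  obtain ⟨u, k, rfl⟩ := dec_surj c
  rw [bxor_dec, bxor_dec, bxor_dec, bxor_dec]
  congr 1
  · cases s <;> cases t <;> cases u <;> rfl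
  · exact Nat.xor_assoc m n k

theorem zero_bxor (a : Int) : PySem.Int.bxor 0 a = a := by
  rw [PySem.Int.bxor_comm]; exact PySem.Int.bxor_zero a

-- xor of a list
def xorL (l : List Int) : Int := l.foldr PySem.Int.bxor 0

theorem xorL_cons (a : Int) (l : List Int) : xorL (a :: l) = PySem.Int.bxor a (xorL l) := rfl

theorem bxor_mix (a b c d : Int) :
    PySem.Int.bxor (PySem.Int.bxor a b) (PySem.Int.bxor c d)
      = PySem.Int.bxor (PySem.Int.bxor a c) (PySem.Int.bxor b d) := by
  rw [bxor_assoc a b, ← bxor_assoc b c d, PySem.Int.bxor_comm b c,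
      bxor_assoc c b d, ← bxor_assoc a c]

theorem xorL_map_bxor {α : Type} (f g : α → Int) (l : List α) :
    xorL (l.map (fun x => PySem.Int.bxor (f x) (g x)))
      = PySem.Int.bxor (xorL (l.map f)) (xorL (l.map g)) := by
  induction l with
  | nil => simp [xorL]
  | cons a l ih =>
    simp only [List.map_cons, xorL_cons, ih]
    exact bxor_mix (f a) (g a) _ _

theorem xorL_append_zero (l : List Int) : xorL (l ++ [0]) = xorL l := by
  induction l with
  | nil => rfl
  | cons a l ih => simp only [List.cons_append, xorL_cons, ih]

-- ---- the model entry: xor over m with C(i,m) odd ----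
def entM (v : List Int) (i j : Nat) : Int :=
  xorL ((List.range (i + 1)).map
    (fun m => if Nat.choose i m % 2 = 1 then v.getD (j + m) 0 else 0))

-- B's running-binomial fold computes entM
theorem foldInv (v : List Int) (i j : Nat) (cnt : Nat) :
    ∀ (s : Nat) (e : Int), s + cnt = i + 1 →
      ((List.range' s cnt).foldl
        (fun (ec : Int × Int) m =>
          (if PySem.Int.mod ec.2 2 = 1 then PySem.Int.bxor ec.1 (v.getD (j + m) 0) else ec.1,
           PySem.Int.floordiv (ec.2 * ((i : Int) - (m : Int))) ((m : Int) + 1)))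
        (e, ((Nat.choose i s : Nat) : Int))).1
      = PySem.Int.bxor e (xorL ((List.range' s cnt).map
          (fun m => if Nat.choose i m % 2 = 1 then v.getD (j + m) 0 else 0))) := by
  induction cnt with
  | zero =>
    intro s e _
    simp [xorL, PySem.Int.bxor_zero]
  | succ cnt ih =>
    intro s e hs
    have hsle : s ≤ i := by omega
    rw [List.range'_succ, List.foldl_cons, List.map_cons, xorL_cons]
    have hmod : PySem.Int.mod ((Nat.choose i s : Nat) : Int) 2 = ((Nat.choose i s % 2 : Nat) : Int) := by
      exact_mod_cast PySem.Int.mod_natCast (Nat.choose i s) 2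
    have hcond : (PySem.Int.mod ((Nat.choose i s : Nat) : Int) 2 = 1) ↔ Nat.choose i s % 2 = 1 := by
      rw [hmod]; exact_mod_cast Iff.rfl
    have hbin : PySem.Int.floordiv (((Nat.choose i s : Nat) : Int) * ((i : Int) - (s : Int)))
        ((s : Int) + 1) = ((Nat.choose i (s + 1) : Nat) : Int) := by
      have h1 : ((i : Int) - (s : Int)) = ((i - s : Nat) : Int) := by omega
      have h2 : ((s : Int) + 1) = ((s + 1 : Nat) : Int) := by omega
      rw [h1, h2, ← Nat.cast_mul, ← Nat.choose_succ_right_eq]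
      have h3 := PySem.Int.floordiv_natCast (Nat.choose i (s + 1) * (s + 1)) (s + 1)
      rw [h3, Nat.mul_div_cancel _ (by omega)]
    have hstep := ih (s + 1)
      (if PySem.Int.mod ((Nat.choose i s : Nat) : Int) 2 = 1
        then PySem.Int.bxor e (v.getD (j + s) 0) else e) (by omega)
    simp only [hbin] at *
    rw [hstep]
    by_cases hc : Nat.choose i s % 2 = 1
    · rw [if_pos (hcond.mpr hc), if_pos hc, bxor_assoc]
    · rw [if_neg (fun hx => hc (hcond.mp hx)), if_neg hc, zero_bxor]

theorem entryAlt_eq_entM (v : List Int) (i j : Nat) : entryAlt v i j = entM v i j := by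
  unfold entryAlt entM
  have h0 := foldInv v i j (i + 1) 0 0 (by omega)
  rw [List.range_eq_range']
  simp only [Nat.choose_zero_right, Nat.cast_one] at h0
  rw [h0, zero_bxor]

-- Pascal parity step
theorem entM_succ (v : List Int) (i j : Nat) :
    entM v (i + 1) j = PySem.Int.bxor (entM v i j) (entM v i (j + 1)) := by
  unfold entM
  have hsplit : (List.range (i + 1 + 1)).map
        (fun m => if Nat.choose (i + 1) m % 2 = 1 then v.getD (j + m) 0 else 0)
      = (List.range (i + 1 + 1)).map
        (fun m => PySem.Int.bxor
          (if Nat.choose i m % 2 = 1 then v.getD (j + m) 0 else 0)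
          (if 1 ≤ m ∧ Nat.choose i (m - 1) % 2 = 1 then v.getD (j + m) 0 else 0)) := by
    refine List.map_congr_left (fun m _ => ?_)
    match m with
    | 0 => simp [Nat.choose, PySem.Int.bxor_zero]
    | k + 1 =>
      rw [Nat.choose_succ_succ, Nat.add_sub_cancel]
      simp only [Nat.succ_eq_add_one]
      by_cases h1 : Nat.choose i k % 2 = 1 <;> by_cases h2 : Nat.choose i (k + 1) % 2 = 1
      · rw [if_neg (by omega), if_pos h2, if_pos (by omega), PySem.Int.bxor_self]
      · rw [if_pos (by omega), if_neg h2, if_pos (by omega), zero_bxor]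
      · rw [if_pos (by omega), if_pos h2, if_neg (by omega), PySem.Int.bxor_zero]
      · rw [if_neg (by omega), if_neg h2, if_neg (by omega), PySem.Int.bxor_zero]
  rw [hsplit, xorL_map_bxor]
  congr 1
  · -- the first component: drop the last (zero) term
    rw [List.range_succ (n := i + 1), List.map_append, List.map_singleton,
        Nat.choose_eq_zero_of_lt (by omega), if_neg (by omega), xorL_append_zero]
  · -- the second component: shift the index
    rw [List.range_succ_eq_map (n := i + 1), List.map_cons, xorL_cons, if_neg (by omega), zero_bxor,
        List.map_map]
    refine congrArg xorL (List.map_congr_left (fun k _ => ?_))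
    have h1 : (1 ≤ k + 1 ∧ Nat.choose i (k + 1 - 1) % 2 = 1) ↔ Nat.choose i k % 2 = 1 := by
      constructor
      · intro h; simpa using h.2
      · intro h; exact ⟨by omega, by simpa using h⟩
    have h2 : j + (k + 1) = j + 1 + k := by omega
    simp only [Function.comp, h2]
    by_cases hc : Nat.choose i k % 2 = 1
    · rw [if_pos (h1.mpr hc), if_pos hc]
    · rw [if_neg (fun hx => hc (h1.mp hx)), if_neg hc]

-- ---- rows ----
def rowE (v : List Int) (i : Nat) : List Int :=
  (List.range (v.length - i)).map (fun j => entM v i j)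

theorem entM_zero (v : List Int) (j : Nat) : entM v 0 j = v.getD j 0 := by
  simp [entM, List.range_one, xorL, PySem.Int.bxor_zero]

theorem map_getD_range (v : List Int) : (List.range v.length).map (fun j => v.getD j 0) = v := by
  apply List.ext_getElem
  · simp
  · intro i h1 h2
    simp only [List.getElem_map, List.getElem_range]
    rw [List.getD_eq_getElem?_getD, List.getElem?_eq_getElem h2]; rfl

theorem rowE_zero (v : List Int) : rowE v 0 = v := by
  unfold rowE
  simp only [Nat.sub_zero, entM_zero]
  exact map_getD_range v

theorem pairAuxA_spec (r : List Int) (fuel : Nat) :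
    ∀ (index : Nat) (acc : List Int), r.length - 1 - index ≤ fuel →
      pairAuxA r fuel index acc
        = acc ++ (List.range' index (r.length - 1 - index)).map
            (fun j => PySem.Int.bxor (r.getD j 0) (r.getD (j + 1) 0)) := by
  induction fuel with
  | zero =>
    intro index acc h
    have h0 : r.length - 1 - index = 0 := by omega
    simp [pairAuxA, h0]
  | succ fuel ih =>
    intro index acc h
    unfold pairAuxA
    by_cases hlt : index < r.length - 1
    · rw [if_pos hlt, ih (index + 1) _ (by omega)]
      have hn : r.length - 1 - index = (r.length - 1 - (index + 1)) + 1 := by omega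
      rw [hn, List.range'_succ, List.map_cons]
      simp
    · rw [if_neg hlt]
      have h0 : r.length - 1 - index = 0 := by omega
      simp [h0]

theorem pairAuxA_rowE (v : List Int) (i : Nat) (h : i < v.length) :
    pairAuxA (rowE v i) (rowE v i).length 0 [] = rowE v (i + 1) := by
  rw [pairAuxA_spec (rowE v i) (rowE v i).length 0 [] (by omega)]
  have hlen : (rowE v i).length = v.length - i := by simp [rowE]
  rw [hlen, List.nil_append, Nat.sub_zero, ← List.range_eq_range']
  have hn : v.length - i - 1 = v.length - (i + 1) := by omega
  rw [hn]
  unfold rowE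
  refine List.map_congr_left (fun j hj => ?_)
  rw [List.mem_range] at hj
  rw [PySem.List.getD_map_range _ _ _ _ (by omega), PySem.List.getD_map_range _ _ _ _ (by omega)]
  exact (entM_succ v i j).symm

theorem triAuxA_spec (v : List Int) (fuel : Nat) :
    ∀ (i : Nat), i < v.length → v.length - 1 - i ≤ fuel →
      triAuxA fuel ((List.range (i + 1)).map (rowE v)) (rowE v i)
        = (List.range v.length).map (rowE v) := by
  induction fuel with
  | zero =>
    intro i hi hf
    have hlast : i + 1 = v.length := by omega
    rw [triAuxA, hlast]
  | succ fuel ih =>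
    intro i hi hf
    unfold triAuxA
    have hlen : (rowE v i).length = v.length - i := by simp [rowE]
    by_cases hgt : (rowE v i).length > 1
    · rw [if_pos hgt, pairAuxA_rowE v i hi]
      have hconcat : List.map (rowE v) (List.range (i + 1)) ++ [rowE v (i + 1)]
          = List.map (rowE v) (List.range (i + 1 + 1)) := by
        rw [List.range_succ (n := i + 1), List.map_append]; rfl
      rw [hconcat]
      exact ih (i + 1) (by omega) (by omega)
    · rw [if_neg hgt]
      have hlast : i + 1 = v.length := by omega
      rw [hlast]

-- ===== VERDICT (by name: the statement is the Claim_ definition above) =====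
theorem build_difference_triangle_spec : Claim_equal_build_difference_triangle := by
  intro values _
  unfold Spec_build_difference_triangle build_difference_triangle build_difference_triangle_alt
  have halt : (List.range (max 1 values.length)).map (fun i =>
      (List.range (values.length - i)).map (fun j => entryAlt values i j))
      = (List.range (max 1 values.length)).map (rowE values) := by
    refine List.map_congr_left (fun i _ => ?_)
    exact List.map_congr_left (fun j _ => entryAlt_eq_entM values i j)
  rw [halt]
  by_cases h0 : values.length = 0
  · have : values = [] := List.eq_nil_of_length_eq_zero h0
    subst this
    simp [triAuxA, rowE, entM]
  · have h1 : 0 < values.length := Nat.pos_of_ne_zero h0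
    have hmax : max 1 values.length = values.length := by omega
    rw [hmax]
    have hts := triAuxA_spec values values.length 0 h1 (by omega)
    rw [show (0 : Nat) + 1 = 1 from rfl, List.range_one, List.map_cons, List.map_nil,
        rowE_zero values] at hts
    exact hts
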